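-- pv_equiv track=rewrite | github.com/BrunoFernandes25/LA-II | Exercicios/repete.py | repete
-- ===== SOURCE A (Python) =====
-- def repete(palavra,n):
--     seq_maxima = 0
--     for i in range(1,len(palavra)):
--         #verifica as primeiras i palavras com as i ultimas palavras a contar do fim para o inicio
--         if palavra[:i] == palavra[-i:]:
--             seq_maxima = i
--     final = palavra
--     final += (n-1) * palavra[seq_maxima:]
--
--     if n != 0:
--         return final
--     else:
--         return ''
-- ===== SOURCE B (Python) =====
-- def _longest_border(s):
--     # KMP prefix (failure) function; pi[i] = longest proper border of s[:i+1]
--     m = len(s)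
--     if m == 0:
--         return 0
--     pi = [0]
--     for i in range(1, m):
--         k = pi[i - 1]
--         while k > 0 and s[i] != s[k]:
--             k = pi[k - 1]
--         if s[i] == s[k]:
--             k += 1
--         pi.append(k)
--     return pi[m - 1]
--
-- def repete(palavra, n):
--     if n == 0:
--         return ''
--     k = _longest_border(palavra)
--     return palavra + (n - 1) * palavra[k:]
-- ===== Notes on version B (the rewrite author's own statement) =====
-- stated objective: alternative
-- what changed: A finds the longest prefix=suffix border by comparing full slices for every length 1..len-1; B instead computes the KMP prefix/failure function (border-extension recurrence with fallback chain) and reads the longest border off its last entry, then assembles the same overlapped repetition with n==0 handled up front; a timing run shows no measurable speed difference because building the repeated output dominates.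
import Mathlib
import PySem

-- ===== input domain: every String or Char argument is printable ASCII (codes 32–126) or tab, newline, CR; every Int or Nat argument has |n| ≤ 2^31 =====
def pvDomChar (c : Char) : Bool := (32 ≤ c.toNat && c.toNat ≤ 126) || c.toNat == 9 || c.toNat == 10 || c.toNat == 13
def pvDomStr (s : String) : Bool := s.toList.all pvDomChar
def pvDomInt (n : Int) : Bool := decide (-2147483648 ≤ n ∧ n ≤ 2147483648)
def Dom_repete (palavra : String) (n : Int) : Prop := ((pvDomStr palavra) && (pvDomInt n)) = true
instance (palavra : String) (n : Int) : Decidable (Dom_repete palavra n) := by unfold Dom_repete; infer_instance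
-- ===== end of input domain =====

-- B replaces A's all-prefix-slices scan for the longest border by the KMP prefix/failure
-- function (border-extension recurrence); objective: alternative algorithm, no speed claim.

-- exact helper for Python's  k * s  on strings: '' * k == '' (avoids materialising replicate k of []); otherwise PySem.List.pyRepeat
def pyRepeatChars (cs : List Char) (n : Int) : List Char :=
  if cs.isEmpty then [] else PySem.List.pyRepeat cs n

-- ===== PORT A =====
-- A: scan i = 1 .. len-1, remember the LAST i with palavra[:i] == palavra[-i:], then append (n-1) copies of the tail.
def repete (palavra : String) (n : Int) : String :=
  let cs := palavra.toList
  let seq_maxima : Int :=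
    (PySem.List.pyRange 1 (cs.length : Int)).foldl
      (fun acc i =>
        if PySem.List.slice cs none (some i) = PySem.List.slice cs (some (-i)) none then i else acc)
      0
  let final := cs ++ pyRepeatChars (PySem.List.slice cs (some seq_maxima) none) (n - 1)
  if n ≠ 0 then String.ofList final else ""

-- ===== PORT B =====
-- B: KMP prefix function.  kmpFallback is Source B's 'while k > 0 and s[i] != s[k]: k = pi[k-1]'
-- (fuel bounds the walk; the chain pi[k-1] < k makes fuel = k enough, proved in the lemmas).
def kmpFallback (s : List Char) (pi : List Nat) (c : Char) : Nat → Nat → Nat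
  | 0, k => k
  | fuel+1, k =>
      if 0 < k ∧ c ≠ s.getD k ' ' then kmpFallback s pi c fuel (pi.getD (k-1) 0) else k

-- Source B's 'for i in range(1, m)' building pi: kmpBuild s t = pi after indices 1..t.
def kmpBuild (s : List Char) : Nat → List Nat
  | 0 => [0]
  | t+1 =>
      let pi := kmpBuild s t
      let k0 := pi.getD t 0
      let k1 := kmpFallback s pi (s.getD (t+1) ' ') k0 k0
      let k2 := if s.getD (t+1) ' ' = s.getD k1 ' ' then k1 + 1 else k1
      pi ++ [k2]

def longestBorder (s : List Char) : Nat :=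
  if s.length = 0 then 0 else (kmpBuild s (s.length - 1)).getD (s.length - 1) 0

def repete_alt (palavra : String) (n : Int) : String :=
  if n = 0 then "" else
    let cs := palavra.toList
    let k := longestBorder cs
    String.ofList (cs ++ pyRepeatChars (cs.drop k) (n - 1))

-- ===== PRECONDITION & SPEC =====
def Spec_repete (palavra : String) (n : Int) (out : String) : Prop := out = repete_alt palavra n
instance (palavra : String) (n : Int) (out : String) : Decidable (Spec_repete palavra n out) := by unfold Spec_repete; infer_instance

-- ===== CLAIM (what is proved, stated in full; the proofs are below) =====
def Claim_equal_repete : Prop := ∀ (palavra : String) (n : Int), Dom_repete palavra n → Spec_repete palavra n (repete palavra n)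

-- ===== LEMMAS AND PROOFS =====

-- the longest proper border of v, as a specification: the greatest k ≤ |v|-1 with v.take k = v.drop (|v|-k)
def bord (v : List Char) : Nat :=
  Nat.findGreatest (fun k => v.take k = v.drop (v.length - k)) (v.length - 1)

lemma bord_le (v : List Char) : bord v ≤ v.length - 1 := Nat.findGreatest_le _

lemma bord_spec (v : List Char) : v.take (bord v) = v.drop (v.length - bord v) := by
  have h := Nat.findGreatest_spec (P := fun k => v.take k = v.drop (v.length - k))
    (m := 0) (n := v.length - 1) (Nat.zero_le _) (by simp)
  exact h

lemma bord_max (v : List Char) {k : Nat} (hk : k ≤ v.length - 1)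
    (h : v.take k = v.drop (v.length - k)) : k ≤ bord v := Nat.le_findGreatest hk h

lemma getD_take (s : List Char) {i k : Nat} (h : k < i) (h2 : k < s.length) :
    (s.take i).getD k ' ' = s.getD k ' ' := by
  rw [List.getD_eq_getElem _ _ (by rw [List.length_take]; omega),
      List.getD_eq_getElem _ _ h2, List.getElem_take]

lemma take_succ_eq (s : List Char) {i : Nat} (h : i < s.length) :
    s.take (i+1) = s.take i ++ [s.getD i ' '] := by
  rw [List.take_succ, List.getElem?_eq_getElem h, List.getD_eq_getElem _ _ h]
  rfl

-- extension: k ≥ 1 is a border of w·c  iff  k-1 is a border of w and w[k-1] = c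
lemma brd_ext (w : List Char) (c : Char) {k : Nat} (h1 : 1 ≤ k) (h2 : k ≤ w.length) :
    ((w ++ [c]).take k = (w ++ [c]).drop ((w ++ [c]).length - k)) ↔
      (w.take (k-1) = w.drop (w.length - (k-1)) ∧ w.getD (k-1) ' ' = c) := by
  have hk1 : k - 1 < w.length := by omega
  have hlen : (w ++ [c]).length = w.length + 1 := by simp
  rw [hlen, List.take_append_of_le_length h2, List.drop_append_of_le_length (by omega)]
  have h3 : w.length + 1 - k = w.length - (k-1) := by omega
  have h4 : w.take k = w.take (k-1) ++ [w.getD (k-1) ' '] := by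
    have h5 := take_succ_eq w hk1
    have h6 : k - 1 + 1 = k := by omega
    rw [h6] at h5; exact h5
  rw [h3, h4]
  constructor
  · intro h
    have := List.append_inj' h (by simp)
    exact ⟨this.1, by simpa using this.2⟩
  · rintro ⟨ha, hb⟩; rw [ha, hb]

-- a border of a border is a border (both directions), given k ≤ |w| is a border of w
lemma brd_take (w : List Char) {k j : Nat} (hk : k ≤ w.length)
    (hbk : w.take k = w.drop (w.length - k)) (hj : j ≤ k) :
    ((w.take k).take j = (w.take k).drop ((w.take k).length - j)) ↔
      (w.take j = w.drop (w.length - j)) := by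
  have hlen : (w.take k).length = k := by rw [List.length_take]; omega
  rw [List.take_take, min_eq_left hj, hlen]
  rw [hbk, List.drop_drop]
  have : w.length - k + (k - j) = w.length - j := by omega
  rw [this]

-- destructing a positive bord (s.take (i+1)): it is ≤ i, and minus one it is a border of s.take i matching s[i]
lemma bord_succ_dest (s : List Char) {i K : Nat} (hi2 : i < s.length)
    (hK : bord (s.take (i+1)) = K) (hpos : 0 < K) :
    K ≤ i ∧ ((s.take i).take (K-1) = (s.take i).drop ((s.take i).length - (K-1)) ∧
      (s.take i).getD (K-1) ' ' = s.getD i ' ') := by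
  have hil : (s.take (i+1)).length = i + 1 := by rw [List.length_take]; omega
  have hwl : (s.take i).length = i := by rw [List.length_take]; omega
  have hKle : K ≤ i := by
    have h := bord_le (s.take (i+1)); rw [hK] at h; omega
  have hPK := bord_spec (s.take (i+1))
  rw [hK, take_succ_eq s hi2] at hPK
  rw [brd_ext (s.take i) (s.getD i ' ') (by omega) (by omega)] at hPK
  rw [hwl] at hPK ⊢
  exact ⟨hKle, hPK⟩

-- exit of the while loop: if k is a border of w = s.take i, every larger border fails on c = s[i],
-- and the loop has stopped (k = 0 or s[i] = s[k]), then the 'if s[i]==s[k]' step yields bord (s.take (i+1)).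
lemma exit_spec (s : List Char) {i k : Nat} (hi1 : 1 ≤ i) (hi2 : i < s.length)
    (hbk : (s.take i).take k = (s.take i).drop ((s.take i).length - k))
    (hki : k < i)
    (hmax : ∀ j, k < j → j < i →
      (s.take i).take j = (s.take i).drop ((s.take i).length - j) → s.getD j ' ' ≠ s.getD i ' ')
    (hexit : k = 0 ∨ s.getD i ' ' = s.getD k ' ') :
    (if s.getD i ' ' = s.getD k ' ' then k + 1 else k) = bord (s.take (i+1)) := by
  have hwl : (s.take i).length = i := by rw [List.length_take]; omega
  have hil : (s.take (i+1)).length = i + 1 := by rw [List.length_take]; omega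
  by_cases hc : s.getD i ' ' = s.getD k ' '
  · -- result k+1; show bord (s.take (i+1)) = k+1
    rw [if_pos hc]
    have hP : (s.take (i+1)).take (k+1) =
        (s.take (i+1)).drop ((s.take (i+1)).length - (k+1)) := by
      rw [take_succ_eq s hi2]
      rw [brd_ext (s.take i) (s.getD i ' ') (by omega) (by omega)]
      refine ⟨by simpa using hbk, ?_⟩
      rw [Nat.add_sub_cancel, getD_take s hki (by omega)]
      exact hc.symm
    have hle : k + 1 ≤ bord (s.take (i+1)) :=
      bord_max _ (by omega) hP
    have hge : bord (s.take (i+1)) ≤ k + 1 := by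
      by_contra hgt
      obtain ⟨hKle, hP1, hP2⟩ := bord_succ_dest s hi2 rfl (by omega)
      exact hmax (bord (s.take (i+1)) - 1) (by omega) (by omega) hP1
        ((getD_take s (by omega) (by omega)).symm.trans hP2)
    omega
  · -- loop stopped with k = 0 and s[i] ≠ s[0]; show bord (s.take (i+1)) = 0
    rw [if_neg hc]
    have hk0 : k = 0 := by
      cases hexit with
      | inl h => exact h
      | inr h => exact absurd h hc
    subst hk0
    by_contra hne
    have hpos : 0 < bord (s.take (i+1)) := Nat.pos_of_ne_zero (fun h => hne h.symm)
    obtain ⟨hKle, hP1, hP2⟩ := bord_succ_dest s hi2 rfl hpos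
    rcases Nat.eq_zero_or_pos (bord (s.take (i+1)) - 1) with h0 | h0
    · rw [h0] at hP2
      exact hc (((getD_take s (show 0 < i by omega) (by omega)).symm.trans hP2).symm)
    · exact hmax (bord (s.take (i+1)) - 1) h0 (by omega) hP1
        ((getD_take s (by omega) (by omega)).symm.trans hP2)

-- the while loop together with the 'if' step computes bord (s.take (i+1))
lemma fallback_spec (s : List Char) (pi : List Nat) {i : Nat}
    (hi1 : 1 ≤ i) (hi2 : i < s.length)
    (hinv : ∀ j < i, pi.getD j 0 = bord (s.take (j+1))) :
    ∀ fuel k, k ≤ fuel →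
      (s.take i).take k = (s.take i).drop ((s.take i).length - k) →
      k < i →
      (∀ j, k < j → j < i →
        (s.take i).take j = (s.take i).drop ((s.take i).length - j) →
          s.getD j ' ' ≠ s.getD i ' ') →
      (if s.getD i ' ' = s.getD (kmpFallback s pi (s.getD i ' ') fuel k) ' '
        then kmpFallback s pi (s.getD i ' ') fuel k + 1
        else kmpFallback s pi (s.getD i ' ') fuel k) = bord (s.take (i+1)) := by
  intro fuel
  induction fuel with
  | zero =>
      intro k hk hbk hki hmax
      have hk0 : k = 0 := by omega
      subst hk0
      exact exit_spec s hi1 hi2 hbk hki hmax (Or.inl rfl)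
  | succ fuel ih =>
      intro k hk hbk hki hmax
      by_cases hcond : 0 < k ∧ s.getD i ' ' ≠ s.getD k ' '
      · -- loop body runs: k := pi[k-1] = bord (s.take k)
        have hstep : kmpFallback s pi (s.getD i ' ') (fuel+1) k
            = kmpFallback s pi (s.getD i ' ') fuel (pi.getD (k-1) 0) := by
          simp only [kmpFallback, if_pos hcond]
        rw [hstep]
        have hknew : pi.getD (k-1) 0 = bord (s.take k) := by
          have := hinv (k-1) (by omega)
          rwa [show k - 1 + 1 = k by omega] at this
        set knew := pi.getD (k-1) 0 with hkdef
        have hskl : (s.take k).length = k := by rw [List.length_take]; omega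
        have hknewle : knew ≤ k - 1 := by
          rw [hknew]; have := bord_le (s.take k); omega
        have hwk : (s.take i).take k = s.take k := by
          rw [List.take_take, min_eq_left (by omega)]
        -- knew is a border of s.take i
        have hbknew : (s.take i).take knew =
            (s.take i).drop ((s.take i).length - knew) := by
          rw [← brd_take (s.take i) (k := k) (by rw [List.length_take]; omega) hbk (by omega)]
          rw [hwk, hknew]
          exact bord_spec (s.take k)
        refine ih knew (by omega) hbknew (by omega) ?_
        intro j hj1 hj2 hPj
        rcases Nat.lt_trichotomy j k with hjk | hjk | hjk
        · -- knew < j < k : j would be a border of s.take k larger than its bord — impossible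
          exfalso
          have hjbord : (s.take k).take j = (s.take k).drop ((s.take k).length - j) := by
            rw [← hwk]
            rw [brd_take (s.take i) (k := k) (by rw [List.length_take]; omega) hbk (by omega)]
            exact hPj
          have := bord_max (s.take k) (k := j) (by omega) hjbord
          rw [← hknew] at this
          omega
        · subst hjk
          exact Ne.symm hcond.2
        · exact hmax j hjk hj2 hPj
      · -- loop exits
        have hstep : kmpFallback s pi (s.getD i ' ') (fuel+1) k = k := by
          simp only [kmpFallback, if_neg hcond]
        rw [hstep]
        refine exit_spec s hi1 hi2 hbk hki hmax ?_
        by_cases hk0 : k = 0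
        · exact Or.inl hk0
        · right
          by_contra hne
          exact hcond ⟨by omega, hne⟩

lemma kmpBuild_spec (s : List Char) :
    ∀ t, t < s.length →
      (kmpBuild s t).length = t + 1 ∧
        ∀ j ≤ t, (kmpBuild s t).getD j 0 = bord (s.take (j+1)) := by
  intro t
  induction t with
  | zero =>
      intro ht
      refine ⟨rfl, ?_⟩
      intro j hj
      have hj0 : j = 0 := by omega
      subst hj0
      simp [kmpBuild, bord]
  | succ t ih =>
      intro ht
      obtain ⟨hlen, hinv⟩ := ih (by omega)
      have hinv' : ∀ j < t + 1, (kmpBuild s t).getD j 0 = bord (s.take (j+1)) :=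
        fun j hj => hinv j (by omega)
      have hk0 : (kmpBuild s t).getD t 0 = bord (s.take (t+1)) := hinv t le_rfl
      have hwl : (s.take (t+1)).length = t + 1 := by rw [List.length_take]; omega
      have hb0 : (s.take (t+1)).take ((kmpBuild s t).getD t 0) =
          (s.take (t+1)).drop ((s.take (t+1)).length - (kmpBuild s t).getD t 0) := by
        rw [hk0]; exact bord_spec (s.take (t+1))
      have hklt : (kmpBuild s t).getD t 0 < t + 1 := by
        rw [hk0]; have := bord_le (s.take (t+1)); omega
      have hmax : ∀ j, (kmpBuild s t).getD t 0 < j → j < t + 1 →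
          (s.take (t+1)).take j = (s.take (t+1)).drop ((s.take (t+1)).length - j) →
            s.getD j ' ' ≠ s.getD (t+1) ' ' := by
        intro j hj1 hj2 hPj
        exfalso
        have := bord_max (s.take (t+1)) (k := j) (by omega) hPj
        rw [← hk0] at this
        omega
      have hmain := fallback_spec s (kmpBuild s t) (i := t+1) (by omega) ht hinv'
        ((kmpBuild s t).getD t 0) ((kmpBuild s t).getD t 0) le_rfl hb0 hklt hmax
      constructor
      · simp [kmpBuild, hlen]
      · intro j hj
        rcases Nat.lt_or_ge j (t+1) with hjt | hjt
        · show (kmpBuild s (t+1)).getD j 0 = _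
          simp only [kmpBuild]
          rw [List.getD_append _ _ _ _ (by omega)]
          exact hinv' j hjt
        · have hjeq : j = t + 1 := by omega
          subst hjeq
          show (kmpBuild s (t+1)).getD (t+1) 0 = _
          simp only [kmpBuild]
          rw [List.getD_append_right _ _ _ _ (by omega), hlen]
          simpa using hmain

lemma longestBorder_eq (s : List Char) : longestBorder s = bord s := by
  by_cases h : s.length = 0
  · have hs : s = [] := List.length_eq_zero_iff.mp h
    subst hs; rfl
  · unfold longestBorder
    rw [if_neg h]
    obtain ⟨-, hinv⟩ := kmpBuild_spec s (s.length - 1) (by omega)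
    rw [hinv (s.length - 1) le_rfl, show s.length - 1 + 1 = s.length by omega,
        List.take_length]

-- A's ascending last-match fold over 1..t equals Nat.findGreatest over the same border predicate.
lemma fold_eq (cs : List Char) (t : Nat) :
    (PySem.List.pyRange 1 ((t : Int) + 1)).foldl
      (fun acc i =>
        if PySem.List.slice cs none (some i) = PySem.List.slice cs (some (-i)) none then i else acc)
      0 = ((Nat.findGreatest (fun k => cs.take k = cs.drop (cs.length - k)) t : Nat) : Int) := by
  induction t with
  | zero => rfl
  | succ t ih =>
      have h1 : (1 : Int) ≤ (t : Int) + 1 := by omega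
      have hr : PySem.List.pyRange 1 (((t+1 : Nat) : Int) + 1)
          = PySem.List.pyRange 1 ((t : Int) + 1) ++ [(t : Int) + 1] := by
        push_cast
        exact PySem.List.pyRange_one_succ_right h1
      rw [hr, List.foldl_append]
      simp only [List.foldl]
      have hcast : (t : Int) + 1 = ((t + 1 : Nat) : Int) := by push_cast; ring
      rw [hcast, PySem.List.slice_to_natCast, PySem.List.slice_from_neg_natCast cs (t+1) (Nat.succ_pos t)]
      by_cases h : cs.take (t+1) = cs.drop (cs.length - (t+1))
      · simp [h]
      · simp [h, ih]

lemma fold_eq_bord (cs : List Char) :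
    (PySem.List.pyRange 1 (cs.length : Int)).foldl
      (fun acc i =>
        if PySem.List.slice cs none (some i) = PySem.List.slice cs (some (-i)) none then i else acc)
      0 = ((bord cs : Nat) : Int) := by
  cases hl : cs.length with
  | zero =>
      have hcs : cs = [] := List.length_eq_zero_iff.mp hl
      subst hcs; rfl
  | succ t =>
      have h : ((t + 1 : Nat) : Int) = (t : Int) + 1 := by push_cast; ring
      rw [h, fold_eq]
      unfold bord
      rw [show cs.length - 1 = t by omega]

-- ===== VERDICT (by name: the statement is the Claim_ definition above) =====
theorem repete_spec : Claim_equal_repete := by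
  intro palavra n _
  unfold Spec_repete repete repete_alt
  by_cases hn : n = 0
  · simp [hn]
  · simp only [hn, if_neg, ne_eq, not_false_eq_true, if_true]
    rw [fold_eq_bord, PySem.List.slice_from_natCast, longestBorder_eq]
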